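-- pv_equiv track=rewrite | github.com/hjleepapa/codingtest_study_hjleegcti | python/hhaze/week3/42840.py | solution
-- ===== SOURCE A (Python) =====
-- def solution(answers):
--     result = [0, 0, 0]
--
--     num_1 = [1, 2, 3, 4, 5]
--     num_2 = [2, 1, 2, 3, 2, 4, 2, 5]
--     num_3 = [3, 3, 1, 1, 2, 2, 4, 4, 5, 5]
--
--     for i, answer in enumerate(answers):
--         if num_1[i % len(num_1)] == answer:
--             result[0] += 1
--         if num_2[i % len(num_2)] == answer:
--             result[1] += 1
--         if num_3[i % len(num_3)] == answer:
--             result[2] += 1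
--
--     return [i + 1 for i, value in enumerate(result) if value == max(result)]
-- ===== SOURCE B (Python) =====
-- def solution(answers):
--     # Histogram approach: the three patterns all repeat within period 40
--     # (lcm of 5, 8, 10), so an answer at index i matches taker k iff
--     # (i % 40, answer) hits taker k's fixed table entry.  One comparison-free
--     # pass builds a histogram of (residue, answer) pairs; each score is then
--     # read off the 40-entry table.
--     patterns = ([1, 2, 3, 4, 5],
--                 [2, 1, 2, 3, 2, 4, 2, 5],
--                 [3, 3, 1, 1, 2, 2, 4, 4, 5, 5])
--     hist = {}
--     for i, a in enumerate(answers):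
--         k = (i % 40, a)
--         hist[k] = hist.get(k, 0) + 1
--     scores = [sum(hist.get((r, p[r % len(p)]), 0) for r in range(40))
--               for p in patterns]
--     best = max(scores)
--     return [i + 1 for i, s in enumerate(scores) if s == best]
-- ===== Notes on version B (the rewrite author's own statement) =====
-- stated objective: alternative
-- what changed: Replaces A's per-element comparisons against three modularly-indexed pattern lists by a histogram of (index mod 40, answer) pairs (40 = lcm of the pattern periods 5, 8, 10) built in one comparison-free pass, from which each taker's score is read off as a sum over a fixed 40-entry lookup table.
import Mathlib
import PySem

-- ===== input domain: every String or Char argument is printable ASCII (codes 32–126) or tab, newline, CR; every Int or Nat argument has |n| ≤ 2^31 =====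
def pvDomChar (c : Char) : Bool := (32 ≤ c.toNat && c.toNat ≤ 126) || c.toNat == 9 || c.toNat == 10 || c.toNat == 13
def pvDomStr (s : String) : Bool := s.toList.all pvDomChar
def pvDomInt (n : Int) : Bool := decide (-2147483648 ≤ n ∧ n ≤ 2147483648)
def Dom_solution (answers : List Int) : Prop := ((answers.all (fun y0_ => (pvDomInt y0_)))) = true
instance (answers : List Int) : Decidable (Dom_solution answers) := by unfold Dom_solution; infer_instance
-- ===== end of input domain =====

-- B replaces A's per-element pattern comparisons by a histogram of (index mod 40, answer)
-- pairs (40 = lcm of the pattern periods) read off against a fixed 40-entry table per taker: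
-- an alternative algorithm, same O(n) cost.

-- ===== PORT A =====
-- `for i, answer in enumerate(answers)` with the three `if`s updating result[0..2]
def solutionLoop : List Int → Nat → Int × Int × Int → Int × Int × Int
  | [], _, r => r
  | a :: rest, i, (x, y, z) =>
      let num1 : List Int := [1, 2, 3, 4, 5]
      let num2 : List Int := [2, 1, 2, 3, 2, 4, 2, 5]
      let num3 : List Int := [3, 3, 1, 1, 2, 2, 4, 4, 5, 5]
      solutionLoop rest (i + 1)
        (if num1.getD (i % num1.length) 0 = a then x + 1 else x,
         if num2.getD (i % num2.length) 0 = a then y + 1 else y,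
         if num3.getD (i % num3.length) 0 = a then z + 1 else z)

def solution (answers : List Int) : List Int :=
  let r := solutionLoop answers 0 (0, 0, 0)
  let result : List Int := [r.1, r.2.1, r.2.2]
  -- [i + 1 for i, value in enumerate(result) if value == max(result)]
  (result.zipIdx.filter
      (fun q => q.1 == (PySem.List.max? result (fun v => v)).getD 0)).map
    (fun q => ((q.2 : Int) + 1))

-- ===== PORT B =====
-- `hist[k] = hist.get(k, 0) + 1` over `for i, a in enumerate(answers)` with k = (i % 40, a)
def bHist (answers : List Int) : PySem.Dict (Nat × Int) Int :=
  answers.zipIdx.foldl (fun d q => d.modify (q.2 % 40, q.1) 0 (· + 1)) PySem.Dict.empty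

-- sum(hist.get((r, p[r % len(p)]), 0) for r in range(40))
def bScore (hist : PySem.Dict (Nat × Int) Int) (p : List Int) : Int :=
  ((List.range 40).map (fun r => hist.getD (r, p.getD (r % p.length) 0) 0)).sum

def solution_alt (answers : List Int) : List Int :=
  let patterns : List (List Int) :=
    [[1, 2, 3, 4, 5], [2, 1, 2, 3, 2, 4, 2, 5], [3, 3, 1, 1, 2, 2, 4, 4, 5, 5]]
  let hist := bHist answers
  let scores := patterns.map (fun p => bScore hist p)
  let best := (PySem.List.max? scores (fun v => v)).getD 0
  (scores.zipIdx.filter (fun q => q.1 == best)).map (fun q => ((q.2 : Int) + 1))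

-- ===== PRECONDITION & SPEC =====
def Spec_solution (answers : List Int) (out : List Int) : Prop := out = solution_alt answers
instance (answers : List Int) (out : List Int) : Decidable (Spec_solution answers out) := by unfold Spec_solution; infer_instance

-- ===== CLAIM (what is proved, stated in full; the proofs are below) =====
def Claim_equal_solution : Prop := ∀ (answers : List Int), Dom_solution answers → Spec_solution answers (solution answers)

-- ===== LEMMAS AND PROOFS =====

-- common spec: number of positions j with p[(i+j) mod len(p)] = l[j]
def cm (p : List Int) : List Int → Nat → Int
  | [], _ => 0
  | a :: rest, i => (if p.getD (i % p.length) 0 = a then 1 else 0) + cm p rest i.succ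

lemma solutionLoop_eq (l : List Int) : ∀ (i : Nat) (x y z : Int),
    solutionLoop l i (x, y, z) =
      (x + cm [1, 2, 3, 4, 5] l i,
       y + cm [2, 1, 2, 3, 2, 4, 2, 5] l i,
       z + cm [3, 3, 1, 1, 2, 2, 4, 4, 5, 5] l i) := by
  induction l with
  | nil => intro i x y z; simp [solutionLoop, cm]
  | cons a rest ih =>
      intro i x y z
      simp only [solutionLoop, cm, ih]
      refine Prod.ext ?_ (Prod.ext ?_ ?_) <;> simp <;> split_ifs <;> ring

-- sum of a one-point indicator over range n
lemma sum_indicator_range (n j : Nat) (hj : j < n) (c : Int) :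
    ((List.range n).map (fun r => if j = r then c else 0)).sum = c := by
  induction n with
  | zero => omega
  | succ n ih =>
      rw [List.range_succ, List.map_append, List.sum_append]
      by_cases h : j = n
      · subst h
        have hz : ((List.range j).map (fun r => if j = r then c else 0)).sum = 0 := by
          apply List.sum_eq_zero
          intro x hx
          simp only [List.mem_map, List.mem_range] at hx
          obtain ⟨r, hr, hrx⟩ := hx
          simp only [show ¬ j = r by omega, if_false] at hrx
          omega
        simp [hz]
      · rw [ih (by omega)]
        simp [h]

-- the histogram's getD is a count over the key list
lemma bHist_getD (answers : List Int) (k : Nat × Int) :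
    (bHist answers).getD k 0 =
      ((answers.zipIdx.map (fun q => (q.2 % 40, q.1))).count k : Int) := by
  unfold bHist
  have hfm : answers.zipIdx.foldl
        (fun d q => d.modify (q.2 % 40, q.1) 0 (· + 1))
        (PySem.Dict.empty : PySem.Dict (Nat × Int) Int)
      = (answers.zipIdx.map (fun q => (q.2 % 40, q.1))).foldl
        (fun d x => d.modify x 0 (· + 1)) PySem.Dict.empty :=
    (List.foldl_map (f := fun q : Int × Nat => (q.2 % 40, q.1))
      (g := fun (d : PySem.Dict (Nat × Int) Int) x => PySem.Dict.modify d x 0 (· + 1))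
      (l := answers.zipIdx) (init := PySem.Dict.empty)).symm
  rw [hfm, PySem.Dict.getD_foldl_modify_add_one]
  simp [PySem.Dict.getD_empty]

-- main bridge: the table sum over residues equals the comparison count cm
lemma table_sum_eq_cm (p : List Int) (hdvd : p.length ∣ 40) :
    ∀ (l : List Int) (i : Nat),
      ((List.range 40).map (fun r =>
          (((l.zipIdx i).map (fun q => (q.2 % 40, q.1))).count
              (r, p.getD (r % p.length) 0) : Int))).sum = cm p l i := by
  intro l
  induction l with
  | nil => intro i; simp [cm]
  | cons a rest ih =>
      intro i
      have hstep : ∀ r : Nat,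
          ((((a :: rest).zipIdx i).map (fun q => (q.2 % 40, q.1))).count
              (r, p.getD (r % p.length) 0) : Int) =
          (((rest.zipIdx (i + 1)).map (fun q => (q.2 % 40, q.1))).count
              (r, p.getD (r % p.length) 0) : Int) +
          (if i % 40 = r then (if p.getD (i % p.length) 0 = a then 1 else 0) else 0) := by
        intro r
        rw [List.zipIdx_cons, List.map_cons, List.count_cons]
        push_cast
        congr 1
        simp only [beq_iff_eq, Prod.mk.injEq]
        by_cases hr : i % 40 = r
        · subst hr
          rw [Nat.mod_mod_of_dvd i hdvd]
          rw [if_pos rfl]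
          simp only [true_and]
          exact if_congr eq_comm rfl rfl
        · simp [hr]
      calc ((List.range 40).map (fun r =>
              ((((a :: rest).zipIdx i).map (fun q => (q.2 % 40, q.1))).count
                  (r, p.getD (r % p.length) 0) : Int))).sum
          = ((List.range 40).map (fun r =>
              (((rest.zipIdx (i + 1)).map (fun q => (q.2 % 40, q.1))).count
                  (r, p.getD (r % p.length) 0) : Int) +
              (if i % 40 = r then (if p.getD (i % p.length) 0 = a then 1 else 0) else 0))).sum := by
            exact congrArg List.sum (List.map_congr_left (fun r _ => hstep r))
        _ = ((List.range 40).map (fun r =>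
              (((rest.zipIdx (i + 1)).map (fun q => (q.2 % 40, q.1))).count
                  (r, p.getD (r % p.length) 0) : Int))).sum +
            ((List.range 40).map (fun r =>
              (if i % 40 = r then (if p.getD (i % p.length) 0 = a then 1 else 0) else 0))).sum := by
            rw [← List.sum_map_add]
        _ = cm p rest (i + 1) + (if p.getD (i % p.length) 0 = a then 1 else 0) := by
            rw [ih (i + 1), sum_indicator_range 40 (i % 40) (Nat.mod_lt i (by omega)) _]
        _ = cm p (a :: rest) i := by simp [cm]; ring

lemma bScore_eq (answers p : List Int) (hdvd : p.length ∣ 40) :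
    bScore (bHist answers) p = cm p answers 0 := by
  unfold bScore
  have h : ∀ r : Nat, (bHist answers).getD (r, p.getD (r % p.length) 0) 0 =
      ((answers.zipIdx.map (fun q => (q.2 % 40, q.1))).count (r, p.getD (r % p.length) 0) : Int) :=
    fun r => bHist_getD answers _
  rw [List.map_congr_left (fun r _ => h r)]
  exact table_sum_eq_cm p hdvd answers 0

-- ===== VERDICT (by name: the statement is the Claim_ definition above) =====
theorem solution_spec : Claim_equal_solution := by
  intro answers _
  unfold Spec_solution solution solution_alt
  simp only [List.map_cons, List.map_nil,
    bScore_eq answers [1, 2, 3, 4, 5] (by norm_num),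
    bScore_eq answers [2, 1, 2, 3, 2, 4, 2, 5] (by norm_num),
    bScore_eq answers [3, 3, 1, 1, 2, 2, 4, 4, 5, 5] (by norm_num),
    solutionLoop_eq, zero_add]
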